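-- pv_equiv track=rewrite | github.com/PriscillaZhao/a-framework-for-n-version-testing | src/n_version_programs/wc_files/bo1/wc.py | maxlinelength
-- ===== SOURCE A (Python) =====
-- def maxlinelength(text):
--     if text == None:
--         return None
--     maxll = 0
--     for i in text.split('\n'):
--         if len(i) > maxll:
--             maxll = len(i)
--     return maxll
-- ===== SOURCE B (Python) =====
-- def maxlinelength(text):
--     if text is None:
--         return None
--     maxll = 0
--     cur = 0
--     for ch in text:
--         if ch == '\n':
--             if cur > maxll:
--                 maxll = cur
--             cur = 0
--         else:
--             cur += 1
--     return maxll if maxll > cur else cur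
-- ===== Notes on version B (the rewrite author's own statement) =====
-- stated objective: alternative
-- what changed: B replaces the split-into-lines list plus a max-over-lines loop by a single character scan that keeps a running current-line length and the max so far, never materializing the list of lines.
import Mathlib
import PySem

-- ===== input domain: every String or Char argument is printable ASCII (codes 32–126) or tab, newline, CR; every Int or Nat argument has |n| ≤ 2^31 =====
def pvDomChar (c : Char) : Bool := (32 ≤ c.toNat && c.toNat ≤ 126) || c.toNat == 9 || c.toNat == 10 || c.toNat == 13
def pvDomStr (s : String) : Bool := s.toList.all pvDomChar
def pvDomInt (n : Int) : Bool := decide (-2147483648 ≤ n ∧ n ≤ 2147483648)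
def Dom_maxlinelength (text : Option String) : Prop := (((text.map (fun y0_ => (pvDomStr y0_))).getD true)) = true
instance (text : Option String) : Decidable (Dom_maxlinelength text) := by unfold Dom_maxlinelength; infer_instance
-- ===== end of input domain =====

-- B replaces split('\n') + max-over-lines by a single character scan with a running line length; same cost, no list of lines.

-- ===== PORT A =====
-- for i in text.split('\n'): if len(i) > maxll: maxll = len(i)
def maxlinelength (text : Option String) : Option Int :=
  match text with
  | none => none
  | some t =>
      some ((PySem.Chars.splitOn t.toList ['\n']).foldl
        (fun maxll i => if (i.length : Int) > maxll then (i.length : Int) else maxll) 0)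

-- ===== PORT B =====
-- single pass: (maxll, cur); newline flushes cur into maxll, otherwise cur += 1
def maxlinelength_alt (text : Option String) : Option Int :=
  match text with
  | none => none
  | some t =>
      let p := t.toList.foldl
        (fun (p : Int × Int) ch =>
          if ch = '\n' then (if p.2 > p.1 then p.2 else p.1, 0) else (p.1, p.2 + 1))
        (0, 0)
      some (if p.1 > p.2 then p.1 else p.2)

-- ===== PRECONDITION & SPEC =====
def Spec_maxlinelength (text : Option String) (out : Option Int) : Prop := out = maxlinelength_alt text
instance (text : Option String) (out : Option Int) : Decidable (Spec_maxlinelength text out) := by unfold Spec_maxlinelength; infer_instance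

-- ===== CLAIM (what is proved, stated in full; the proofs are below) =====
def Claim_equal_maxlinelength : Prop := ∀ (text : Option String), Dom_maxlinelength text → Spec_maxlinelength text (maxlinelength text)

-- ===== LEMMAS AND PROOFS =====

-- structural reference split on '\n'
def pvSplit : List Char → List (List Char)
  | [] => [[]]
  | c :: rest =>
      if c = '\n' then [] :: pvSplit rest
      else
        match pvSplit rest with
        | [] => [[c]]
        | p :: ps => (c :: p) :: ps

def pvConsFirst (pre : List Char) : List (List Char) → List (List Char)
  | [] => [pre]
  | p :: ps => (pre ++ p) :: ps

theorem pvSplit_ne_nil (cs : List Char) : pvSplit cs ≠ [] := by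
  cases cs with
  | nil => simp [pvSplit]
  | cons c rest =>
      simp only [pvSplit]
      split_ifs
      · simp
      · cases pvSplit rest <;> simp

theorem pv_go_eq (fuel : Nat) : ∀ (l cur : List Char) (acc : List (List Char)),
    l.length < fuel →
    PySem.Chars.splitOn.go ['\n'] fuel l cur acc = acc.reverse ++ pvConsFirst cur.reverse (pvSplit l) := by
  induction fuel with
  | zero => intro l cur acc h; omega
  | succ fuel ih =>
      intro l cur acc h
      cases l with
      | nil =>
          simp [PySem.Chars.splitOn.go, pvSplit, pvConsFirst]
      | cons c rest =>
          rw [PySem.Chars.splitOn.go]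
          by_cases hc : c = '\n'
          · subst hc
            have hp : List.isPrefixOf ['\n'] ('\n' :: rest) = true := by
              simp [List.isPrefixOf]
            simp only [hp, if_true, List.length_cons, List.drop_succ_cons, List.length_nil,
              List.drop_zero]
            rw [ih rest [] (cur.reverse :: acc) (by simp at h; omega)]
            simp only [pvSplit, if_true, List.reverse_cons]
            cases hps : pvSplit rest with
            | nil => exact absurd hps (pvSplit_ne_nil rest)
            | cons p ps => simp [pvConsFirst]
          · have hp : List.isPrefixOf ['\n'] (c :: rest) = false := by
              simp [List.isPrefixOf]
              intro h'; exact absurd h'.symm hc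
            simp only [hp, Bool.false_eq_true, if_false]
            rw [ih rest (c :: cur) acc (by simp at h ⊢; omega)]
            simp only [pvSplit, hc, if_false, List.reverse_cons]
            cases hps : pvSplit rest with
            | nil => exact absurd hps (pvSplit_ne_nil rest)
            | cons p ps => simp [pvConsFirst]

theorem pv_splitOn_eq (cs : List Char) : PySem.Chars.splitOn cs ['\n'] = pvSplit cs := by
  rw [PySem.Chars.splitOn, pv_go_eq (cs.length + 1) cs [] [] (by omega)]
  cases hps : pvSplit cs with
  | nil => exact absurd hps (pvSplit_ne_nil cs)
  | cons p ps => simp [pvConsFirst]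

-- named forms of the two fold steps, and A's loop on a ready-made split
def pvAmax (m x : Int) : Int := if x > m then x else m
def pvBstep (p : Int × Int) (ch : Char) : Int × Int :=
  if ch = '\n' then (if p.2 > p.1 then p.2 else p.1, 0) else (p.1, p.2 + 1)
def pvFin (p : Int × Int) : Int := if p.1 > p.2 then p.1 else p.2
def pvArun : List (List Char) → Int → Int → Int
  | [], _, _ => 0
  | p :: ps, m, c => ps.foldl (fun maxll i => pvAmax maxll i.length) (pvAmax m (c + p.length))

theorem pv_scan_eq (cs : List Char) : ∀ (m c : Int),
    pvFin (cs.foldl pvBstep (m, c)) = pvArun (pvSplit cs) m c := by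
  induction cs with
  | nil =>
      intro m c
      simp only [List.foldl_nil, pvSplit, pvArun, List.foldl_nil, List.length_nil,
        Nat.cast_zero, add_zero, pvFin, pvAmax]
      split_ifs <;> omega
  | cons ch rest ih =>
      intro m c
      by_cases hc : ch = '\n'
      · subst hc
        have hstep : pvBstep (m, c) '\n' = (pvAmax m c, 0) := by
          simp [pvBstep, pvAmax]
        rw [List.foldl_cons, hstep, ih (pvAmax m c) 0]
        simp only [pvSplit, if_true]
        cases hps : pvSplit rest with
        | nil => exact absurd hps (pvSplit_ne_nil rest)
        | cons p ps =>
            simp only [pvArun, List.foldl_cons, List.length_nil, Nat.cast_zero, add_zero, zero_add]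
      · have hstep : pvBstep (m, c) ch = (m, c + 1) := by
          simp [pvBstep, hc]
        rw [List.foldl_cons, hstep, ih m (c + 1)]
        simp only [pvSplit, if_neg hc]
        cases hps : pvSplit rest with
        | nil => exact absurd hps (pvSplit_ne_nil rest)
        | cons p ps =>
            simp only [pvArun, List.length_cons]
            have : (c + 1 + (p.length : Int)) = (c + ((p.length + 1 : Nat) : Int)) := by
              push_cast; ring
            rw [this]

-- ===== VERDICT (by name: the statement is the Claim_ definition above) =====
theorem maxlinelength_spec : Claim_equal_maxlinelength := by
  intro text _
  unfold Spec_maxlinelength maxlinelength maxlinelength_alt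
  cases text with
  | none => rfl
  | some t =>
      have hb : (fun (p : Int × Int) ch =>
          if ch = '\n' then (if p.2 > p.1 then p.2 else p.1, 0) else (p.1, p.2 + 1)) = pvBstep := rfl
      have ha : (fun (maxll : Int) (i : List Char) =>
          if (i.length : Int) > maxll then (i.length : Int) else maxll)
          = (fun maxll i => pvAmax maxll i.length) := rfl
      simp only [pv_splitOn_eq, hb, ha]
      have hscan := pv_scan_eq t.toList 0 0
      simp only [pvFin] at hscan
      rw [hscan]
      cases hps : pvSplit t.toList with
      | nil => exact absurd hps (pvSplit_ne_nil t.toList)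
      | cons p ps => simp [pvArun, pvAmax]
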